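-- pv_equiv track=rewrite | github.com/jasonrute/lean_gym_prototype | scripts/generate_boilerplate.py | pytype
-- ===== SOURCE A (Python) =====
-- def pytype(leantype):
--     if leantype in ["int", "nat"]:
--         return "int"
--     if leantype == "bool":
--         return "bool"
--     if leantype == "string":
--         return "str"
--     if " " in leantype:
--         type1, type2 = leantype.split(" ", 1)
--         type2 = type2.strip()
--         if type2.startswith("(") and type2.endswith(")"):
--             type2 = type2[1:-1]
--         return cap_case(type1) + "[" + pytype(type2) + "]"
--     return cap_case(leantype)
--
-- def cap_case(s):
--     return ''.join(i.capitalize() for i in s.split('_'))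
-- ===== SOURCE B (Python) =====
-- BASE = {"int": "int", "nat": "int", "bool": "bool", "string": "str"}
--
--
-- def cap_case(s):
--     # single scan with a word-start flag instead of split/capitalize/join
--     out = []
--     start = True
--     for ch in s:
--         if ch == '_':
--             start = True
--         elif start:
--             out.append(ch.upper())
--             start = False
--         else:
--             out.append(ch.lower())
--     return ''.join(out)
--
--
-- def pytype(leantype):
--     # phase 1: parse the chain of outer type constructors into a list
--     heads = []
--     cur = leantype
--     while cur not in BASE and " " in cur:
--         head, tail = cur.split(" ", 1)
--         tail = tail.strip()
--         if tail.startswith("(") and tail.endswith(")"):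
--             tail = tail[1:-1]
--         heads.append(head)
--         cur = tail
--     # phase 2: map the innermost base, then wrap back-to-front
--     py = BASE.get(cur)
--     if py is None:
--         py = cap_case(cur)
--     for h in reversed(heads):
--         py = cap_case(h) + "[" + py + "]"
--     return py
-- ===== Notes on version B (the rewrite author's own statement) =====
-- stated objective: alternative
-- what changed: Replaces A's self-recursion with a two-phase algorithm: a parse loop collects the chain of constructor heads into a list with the base name resolved through a lookup table, and a second back-to-front fold wraps the result; cap_case is rewritten as a single character scan with a word-start flag instead of split/capitalize/join.
import Mathlib
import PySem

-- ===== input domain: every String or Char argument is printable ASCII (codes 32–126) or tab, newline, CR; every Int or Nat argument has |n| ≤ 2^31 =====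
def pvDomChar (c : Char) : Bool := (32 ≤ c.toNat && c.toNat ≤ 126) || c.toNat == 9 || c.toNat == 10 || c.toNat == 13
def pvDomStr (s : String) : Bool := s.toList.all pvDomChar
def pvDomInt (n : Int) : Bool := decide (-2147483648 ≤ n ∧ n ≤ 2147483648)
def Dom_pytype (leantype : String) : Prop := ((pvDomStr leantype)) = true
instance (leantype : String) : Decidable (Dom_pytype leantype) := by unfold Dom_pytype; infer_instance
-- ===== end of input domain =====

-- B replaces A's recursion by a parse-then-assemble two-phase algorithm (heads list + table lookup + back-to-front fold) and a scan-based cap_case (objective: alternative, same cost).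

-- termination helpers (cited by both ports' decreasing_by)
theorem pv_strip_tail_lt (cs : List Char) (h : PySem.Chars.isIn [' '] cs = true) :
    (PySem.Chars.strip ((cs.dropWhile (· ≠ ' ')).tail)).length < cs.length := by
  have hmem : ' ' ∈ cs := by
    have := (PySem.Chars.isIn_iff_infix [' '] cs).mp h
    exact (List.singleton_sublist.mp this.sublist)
  have hne : cs.dropWhile (· ≠ ' ') ≠ [] := by
    intro hnil
    have := List.dropWhile_eq_nil_iff.mp hnil ' ' hmem
    simp at this
  have h1 : (cs.dropWhile (· ≠ ' ')).length ≤ cs.length := List.length_dropWhile_le _ _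
  have h2 : 0 < (cs.dropWhile (· ≠ ' ')).length := List.length_pos_iff.mpr hne
  have h3 : ((cs.dropWhile (· ≠ ' ')).tail).length = (cs.dropWhile (· ≠ ' ')).length - 1 :=
    List.length_tail
  have h4 : ∀ l : List Char, (PySem.Chars.strip l).length ≤ l.length := by
    intro l
    simp only [PySem.Chars.strip, PySem.Chars.rstrip, PySem.Chars.lstrip]
    calc (List.dropWhile PySem.Chars.isspace (List.dropWhile PySem.Chars.isspace l).reverse).reverse.length
        ≤ (List.dropWhile PySem.Chars.isspace l).reverse.length := by
          rw [List.length_reverse]; exact List.length_dropWhile_le _ _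
      _ ≤ l.length := by rw [List.length_reverse]; exact List.length_dropWhile_le _ _
  have := h4 ((cs.dropWhile (· ≠ ' ')).tail)
  omega

theorem pv_slice_le (xs : List Char) :
    (PySem.Chars.slice xs (some 1) (some (-1))).length ≤ xs.length := by
  simp only [PySem.Chars.slice_eq_listSlice, PySem.List.length_slice]
  have := PySem.List.clampIdx_le xs.length (-1)
  omega

-- ===== PORT A =====
-- i.capitalize(): first char upper, rest lower — exact on the ASCII domain
def pyCapitalize (cs : List Char) : List Char :=
  match cs with
  | [] => []
  | c :: rest => PySem.Chars.upperChar c :: PySem.Chars.lower rest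

-- cap_case(s) = ''.join(i.capitalize() for i in s.split('_'))
def capCase (cs : List Char) : List Char :=
  PySem.Chars.join [] ((PySem.Chars.splitOn cs ['_']).map pyCapitalize)

-- transliteration of A (recursive); split(" ", 1) ported by hand as takeWhile/dropWhile on the first space (exact)
def pytypeAux (cs : List Char) : List Char :=
  if cs = "int".toList ∨ cs = "nat".toList then "int".toList
  else if cs = "bool".toList then "bool".toList
  else if cs = "string".toList then "str".toList
  else if h : PySem.Chars.isIn [' '] cs = true then
    let type1 := cs.takeWhile (· ≠ ' ')
    let t2 := PySem.Chars.strip ((cs.dropWhile (· ≠ ' ')).tail)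
    let type2 := if PySem.Chars.startswith t2 ['('] && PySem.Chars.endswith t2 [')']
                 then PySem.Chars.slice t2 (some 1) (some (-1)) else t2
    capCase type1 ++ ['['] ++ pytypeAux type2 ++ [']']
  else capCase cs
termination_by cs.length
decreasing_by
  have h1 := pv_strip_tail_lt cs h
  have h2 := pv_slice_le (PySem.Chars.strip ((cs.dropWhile (· ≠ ' ')).tail))
  split <;> omega

def pytype (leantype : String) : String := String.mk (pytypeAux leantype.toList)

-- ===== PORT B =====
-- BASE = {"int": "int", "nat": "int", "bool": "bool", "string": "str"}
def baseDict : PySem.Dict (List Char) (List Char) :=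
  PySem.Dict.ofList [("int".toList, "int".toList), ("nat".toList, "int".toList),
                     ("bool".toList, "bool".toList), ("string".toList, "str".toList)]

-- Source B's cap_case: one for-loop over the characters with state (out, start)
def capScanStep (st : List Char × Bool) (ch : Char) : List Char × Bool :=
  if ch = '_' then (st.1, true)
  else if st.2 = true then (st.1 ++ [PySem.Chars.upperChar ch], false)
  else (st.1 ++ [PySem.Chars.lowerChar ch], false)

def capCaseB (cs : List Char) : List Char := (cs.foldl capScanStep ([], true)).1

-- Source B's phase-1 while loop: collect the constructor heads, return them with the final base
def parseHeads (heads : List (List Char)) (cur : List Char) : List (List Char) × List Char :=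
  if h : baseDict.contains cur = false ∧ PySem.Chars.isIn [' '] cur = true then
    let head := cur.takeWhile (· ≠ ' ')
    let tl := PySem.Chars.strip ((cur.dropWhile (· ≠ ' ')).tail)
    let tl' := if PySem.Chars.startswith tl ['('] && PySem.Chars.endswith tl [')']
               then PySem.Chars.slice tl (some 1) (some (-1)) else tl
    parseHeads (heads ++ [head]) tl'
  else (heads, cur)
termination_by cur.length
decreasing_by
  have h1 := pv_strip_tail_lt cur h.2
  have h2 := pv_slice_le (PySem.Chars.strip ((cur.dropWhile (· ≠ ' ')).tail))
  split <;> omega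

-- 'py = BASE.get(cur); if py is None: py = cap_case(cur)'
def baseOf (b : List Char) : List Char :=
  match baseDict.get? b with
  | some v => v
  | none => capCaseB b

-- 'for h in reversed(heads): py = cap_case(h) + "[" + py + "]"'
def wrapHeads (heads : List (List Char)) (py : List Char) : List Char :=
  heads.reverse.foldl (fun py h => capCaseB h ++ ['['] ++ py ++ [']']) py

def pytype_alt (leantype : String) : String :=
  let p := parseHeads [] leantype.toList
  String.mk (wrapHeads p.1 (baseOf p.2))

-- ===== PRECONDITION & SPEC =====
def Spec_pytype (leantype : String) (out : String) : Prop := out = pytype_alt leantype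
instance (leantype : String) (out : String) : Decidable (Spec_pytype leantype out) := by unfold Spec_pytype; infer_instance

-- ===== CLAIM =====
def Claim_equal_pytype : Prop := ∀ (leantype : String), Dom_pytype leantype → Spec_pytype leantype (pytype leantype)

-- ===== LEMMAS AND PROOFS =====
-- proof-only helpers: a structural model of splitOn on '_' and of Source B's character scan
def mySplit : List Char → List (List Char)
  | [] => [[]]
  | c :: r => if c = '_' then [] :: mySplit r
              else match mySplit r with
                   | s :: t => (c :: s) :: t
                   | [] => [[c]]

theorem mySplit_ne_nil (l : List Char) : mySplit l ≠ [] := by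
  cases l with
  | nil => simp [mySplit]
  | cons c r =>
    simp only [mySplit]
    split
    · simp
    · split <;> simp

def consHead (p : List Char) : List (List Char) → List (List Char)
  | s :: t => (p ++ s) :: t
  | [] => [p]

theorem go_eq (fuel : Nat) : ∀ (l cur : List Char) (acc : List (List Char)), l.length < fuel →
    PySem.Chars.splitOn.go ['_'] fuel l cur acc = acc.reverse ++ consHead cur.reverse (mySplit l) := by
  induction fuel with
  | zero => intro l cur acc h; omega
  | succ n ih =>
    intro l cur acc h
    cases l with
    | nil =>
      simp [PySem.Chars.splitOn.go, mySplit, consHead]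
    | cons c rest =>
      by_cases hc : c = '_'
      · subst hc
        rw [PySem.Chars.splitOn.go]
        have hpre : (['_'] : List Char).isPrefixOf ('_' :: rest) = true := by simp [List.isPrefixOf]
        rw [if_pos hpre]
        simp only [List.length_cons] at h
        rw [ih _ _ _ (by simpa using Nat.lt_of_succ_lt_succ h)]
        simp only [mySplit]
        cases hms : mySplit rest with
        | nil => exact absurd hms (mySplit_ne_nil rest)
        | cons s t => simp [consHead, hms]
      · rw [PySem.Chars.splitOn.go]
        have hpre : (['_'] : List Char).isPrefixOf (c :: rest) = false := by
          simp [List.isPrefixOf]; exact fun he => hc he.symm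
        rw [if_neg (by simp [hpre])]
        simp only [List.length_cons] at h
        rw [ih _ _ _ (by omega)]
        simp only [mySplit, if_neg hc]
        cases hms : mySplit rest with
        | nil => exact absurd hms (mySplit_ne_nil rest)
        | cons s t => simp [consHead, hms]

theorem splitOn_eq_mySplit (l : List Char) : PySem.Chars.splitOn l ['_'] = mySplit l := by
  rw [PySem.Chars.splitOn, go_eq (l.length + 1) l [] [] (by omega)]
  cases hms : mySplit l with
  | nil => exact absurd hms (mySplit_ne_nil l)
  | cons s t => simp [consHead]

def scanGo : List Char → Bool → List Char
  | [], _ => []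
  | c :: r, start =>
    if c = '_' then scanGo r true
    else if start then PySem.Chars.upperChar c :: scanGo r false
    else PySem.Chars.lowerChar c :: scanGo r false

theorem foldl_capScanStep (cs : List Char) : ∀ (out : List Char) (start : Bool),
    (cs.foldl capScanStep (out, start)).1 = out ++ scanGo cs start := by
  induction cs with
  | nil => intro out start; simp [scanGo]
  | cons c r ih =>
    intro out start
    simp only [List.foldl_cons, capScanStep, scanGo]
    by_cases hc : c = '_'
    · simp [hc, ih]
    · cases start <;> simp [hc, ih]

theorem join_nil_cons (x : List Char) (xs : List (List Char)) :
    PySem.Chars.join [] (x :: xs) = x ++ PySem.Chars.join [] xs := by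
  cases xs <;> simp [PySem.Chars.join, List.intercalate, List.intersperse]

theorem scan_spec (cs : List Char) :
    scanGo cs true = PySem.Chars.join [] ((mySplit cs).map pyCapitalize) ∧
    scanGo cs false = (match mySplit cs with
      | s :: t => PySem.Chars.lower s ++ PySem.Chars.join [] (t.map pyCapitalize)
      | [] => []) := by
  induction cs with
  | nil =>
    constructor <;>
      simp [scanGo, mySplit, PySem.Chars.join, List.intercalate, List.intersperse,
        pyCapitalize, PySem.Chars.lower]
  | cons c r ih =>
    obtain ⟨ih1, ih2⟩ := ih
    by_cases hc : c = '_'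
    · subst hc
      refine ⟨?_, ?_⟩
      · show scanGo r true = _
        rw [ih1]
        simp only [mySplit]
        simp only [if_true]
        rw [List.map_cons, join_nil_cons]
        simp [pyCapitalize]
      · show scanGo r true = _
        rw [ih1]
        simp only [mySplit]
        simp only [if_true]
        simp [PySem.Chars.lower]
    · cases hms : mySplit r with
      | nil => exact absurd hms (mySplit_ne_nil r)
      | cons s t =>
        have hsc : scanGo (c :: r) true = PySem.Chars.upperChar c :: scanGo r false := by
          simp [scanGo, hc]
        have hsc2 : scanGo (c :: r) false = PySem.Chars.lowerChar c :: scanGo r false := by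
          simp [scanGo, hc]
        have hms2 : mySplit (c :: r) = (c :: s) :: t := by
          simp only [mySplit, if_neg hc, hms]
        have hih : scanGo r false = PySem.Chars.lower s ++ PySem.Chars.join [] (t.map pyCapitalize) := by
          rw [ih2, hms]
        refine ⟨?_, ?_⟩
        · rw [hsc, hih, hms2, List.map_cons, join_nil_cons]
          simp [pyCapitalize]
        · rw [hsc2, hih, hms2]
          simp [PySem.Chars.lower]

theorem capCaseB_eq_capCase (cs : List Char) : capCaseB cs = capCase cs := by
  rw [capCaseB, foldl_capScanStep cs [] true, capCase, splitOn_eq_mySplit]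
  simpa using (scan_spec cs).1

theorem baseDict_get? (cur : List Char) :
    baseDict.get? cur =
      if cur = "int".toList then some "int".toList
      else if cur = "nat".toList then some "int".toList
      else if cur = "bool".toList then some "bool".toList
      else if cur = "string".toList then some "str".toList
      else none := by
  simp only [baseDict, PySem.Dict.ofList, PySem.Dict.update, PySem.Dict.get?_insert,
    PySem.Dict.get?_empty, List.foldl_cons, List.foldl_nil]
  split_ifs <;> simp_all

theorem baseDict_contains_false (cur : List Char) :
    baseDict.contains cur = false ↔
      ¬(cur = "int".toList ∨ cur = "nat".toList ∨ cur = "bool".toList ∨ cur = "string".toList) := by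
  rw [← PySem.Dict.get?_eq_none_iff_contains, baseDict_get?]
  split_ifs with h1 h2 h3 h4 <;> simp_all

theorem parseHeads_acc (n : Nat) : ∀ cur : List Char, cur.length ≤ n → ∀ heads,
    parseHeads heads cur = (heads ++ (parseHeads [] cur).1, (parseHeads [] cur).2) := by
  induction n with
  | zero =>
    intro cur hlen heads
    have hc : cur = [] := List.eq_nil_of_length_eq_zero (by omega)
    subst hc
    have hbase : ∀ hs : List (List Char), parseHeads hs [] = (hs, []) := fun hs => by
      rw [parseHeads, dif_neg (by decide)]
    rw [hbase, hbase]
    simp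
  | succ n ih =>
    intro cur hlen heads
    by_cases hcond : baseDict.contains cur = false ∧ PySem.Chars.isIn [' '] cur = true
    · rw [parseHeads, dif_pos hcond]
      conv_rhs => rw [parseHeads, dif_pos hcond]
      simp only []
      have hlt := pv_strip_tail_lt cur hcond.2
      have hsl := pv_slice_le (PySem.Chars.strip ((cur.dropWhile (· ≠ ' ')).tail))
      set tl := PySem.Chars.strip ((cur.dropWhile (· ≠ ' ')).tail) with htl
      set tl2 := if PySem.Chars.startswith tl ['('] && PySem.Chars.endswith tl [')']
                 then PySem.Chars.slice tl (some 1) (some (-1)) else tl with htl2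
      have hlen2 : tl2.length ≤ n := by rw [htl2]; split <;> omega
      rw [ih tl2 hlen2 ([] ++ [cur.takeWhile (· ≠ ' ')]), ih tl2 hlen2 (heads ++ [cur.takeWhile (· ≠ ' ')])]
      simp
    · rw [parseHeads, dif_neg hcond]
      conv_rhs => rw [parseHeads, dif_neg hcond]
      simp

theorem wrapHeads_cons (h : List Char) (hs : List (List Char)) (py : List Char) :
    wrapHeads (h :: hs) py = capCaseB h ++ ['['] ++ wrapHeads hs py ++ [']'] := by
  simp [wrapHeads, List.foldl_append]

theorem main_eq (n : Nat) : ∀ cur : List Char, cur.length ≤ n →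
    wrapHeads (parseHeads [] cur).1 (baseOf (parseHeads [] cur).2) = pytypeAux cur := by
  induction n with
  | zero =>
    intro cur hlen
    have hc : cur = [] := List.eq_nil_of_length_eq_zero (by omega)
    subst hc
    rw [parseHeads, dif_neg (by decide)]
    rw [pytypeAux]
    rw [if_neg (by decide), if_neg (by decide), if_neg (by decide), dif_neg (by decide)]
    simp only [wrapHeads, List.reverse_nil, List.foldl_nil, baseOf, baseDict_get?]
    rw [if_neg (by decide), if_neg (by decide), if_neg (by decide), if_neg (by decide)]
    exact capCaseB_eq_capCase []
  | succ n ih =>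
    intro cur hlen
    by_cases hcont : baseDict.contains cur = false
    · have hnl := (baseDict_contains_false cur).mp hcont
      push_neg at hnl
      obtain ⟨h1, h2, h3, h4⟩ := hnl
      by_cases hsp : PySem.Chars.isIn [' '] cur = true
      · rw [parseHeads, dif_pos ⟨hcont, hsp⟩]
        simp only []
        have hlt := pv_strip_tail_lt cur hsp
        have hsl := pv_slice_le (PySem.Chars.strip ((cur.dropWhile (· ≠ ' ')).tail))
        set tl := PySem.Chars.strip ((cur.dropWhile (· ≠ ' ')).tail) with htl
        set tl2 := if PySem.Chars.startswith tl ['('] && PySem.Chars.endswith tl [')']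
                   then PySem.Chars.slice tl (some 1) (some (-1)) else tl with htl2
        have hlen2 : tl2.length ≤ n := by rw [htl2]; split <;> omega
        rw [parseHeads_acc n tl2 hlen2 ([] ++ [cur.takeWhile (· ≠ ' ')])]
        simp only [List.nil_append, List.singleton_append]
        rw [wrapHeads_cons, ih tl2 hlen2]
        conv_rhs => rw [pytypeAux]
        rw [if_neg (not_or.mpr ⟨h1, h2⟩), if_neg h3, if_neg h4, dif_pos hsp]
        rw [capCaseB_eq_capCase]
      · rw [parseHeads, dif_neg (by simp [hsp])]
        simp only [wrapHeads, List.reverse_nil, List.foldl_nil, baseOf]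
        rw [(PySem.Dict.get?_eq_none_iff_contains baseDict cur).mpr hcont]
        rw [pytypeAux]
        rw [if_neg (not_or.mpr ⟨h1, h2⟩), if_neg h3, if_neg h4, dif_neg hsp]
        exact capCaseB_eq_capCase cur
    · have hsome : ∃ v, baseDict.get? cur = some v := by
        cases hg : baseDict.get? cur with
        | none => exact absurd ((PySem.Dict.get?_eq_none_iff_contains baseDict cur).mp hg) hcont
        | some v => exact ⟨v, rfl⟩
      have hmem : cur = "int".toList ∨ cur = "nat".toList ∨ cur = "bool".toList ∨ cur = "string".toList := by
        by_contra hn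
        obtain ⟨v, hv⟩ := hsome
        rw [baseDict_get?] at hv
        push_neg at hn
        obtain ⟨h1, h2, h3, h4⟩ := hn
        rw [if_neg h1, if_neg h2, if_neg h3, if_neg h4] at hv
        simp at hv
      have hstep : parseHeads [] cur = ([], cur) := by
        rw [parseHeads, dif_neg (by simp [hcont])]
      rw [hstep]
      simp only [wrapHeads, List.reverse_nil, List.foldl_nil, baseOf, baseDict_get?]
      rcases hmem with h | h | h | h <;> subst h
      · rw [if_pos rfl, pytypeAux, if_pos (Or.inl rfl)]
      · rw [if_neg (by decide), if_pos rfl, pytypeAux, if_pos (Or.inr rfl)]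
      · rw [if_neg (by decide), if_neg (by decide), if_pos rfl, pytypeAux,
          if_neg (by decide), if_pos rfl]
      · rw [if_neg (by decide), if_neg (by decide), if_neg (by decide), if_pos rfl, pytypeAux,
          if_neg (by decide), if_neg (by decide), if_pos rfl]

-- ===== VERDICT =====
theorem pytype_spec : Claim_equal_pytype := by
  intro leantype _
  unfold Spec_pytype pytype pytype_alt
  simp only []
  rw [main_eq leantype.toList.length leantype.toList le_rfl]
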